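-- pv_equiv track=rewrite | github.com/MinaPecheux/Advent-Of-Code | 2018/Python/day8.py | compute_node_value
-- ===== SOURCE A (Python) =====
-- def compute_node_value(nodes, node):
--     '''Computes the value of a node depending on whether or not it has children.
--     The function works recursively.
--
--     :param nodes: List of nodes to compute with.
--     :type nodes: dict(int, tuple)
--     :param node: Id of the node to compute the value for.
--     :type node: int
--     '''
--     if node not in nodes: return 0 # skip invalid reference
--     children, metadata = nodes[node]
--     # if no children: the value is the sum of the metadata
--     if len(children) == 0:
--         return sum(metadata)
--     # else: metadata becomes a table of addresses for the children
--     s = 0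
--     for meta in metadata:
--         # extract reference if possible (else skip to the next item)
--         try:
--             child_ref = children[meta - 1]
--         except IndexError:
--             continue
--         # skip root node (avoid infinite cycling)
--         if child_ref == 0:
--             continue
--         # recursively compute the child's value
--         s += compute_node_value(nodes, child_ref)
--     return s
-- ===== SOURCE B (Python) =====
-- def compute_node_value(nodes, node):
--     '''Bottom-up re-implementation: resolves node values iteratively in
--     dependency order (repeated passes until a fixpoint), then looks node up.'''
--     values = {}
--     changed = True
--     while changed:
--         changed = False
--         for k, (children, metadata) in nodes.items():
--             if k in values:
--                 continue
--             if len(children) == 0: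
--                 values[k] = sum(metadata)
--                 changed = True
--                 continue
--             refs = []
--             for m in metadata:
--                 if -len(children) < m <= len(children):
--                     c = children[m - 1]
--                     if c != 0:
--                         refs.append(c)
--             if all(c not in nodes or c in values for c in refs):
--                 values[k] = sum(values.get(c, 0) for c in refs)
--                 changed = True
--     return values.get(node, 0)
-- ===== Notes on version B (the rewrite author's own statement) =====
-- stated objective: alternative
-- what changed: B replaces A's top-down naive recursion by an iterative bottom-up fixpoint: repeated passes over the table resolve each node's value once all its referenced children are resolved, and the answer is a final dictionary lookup, so each node is evaluated at most once instead of once per reference path; on the generated inputs this was not measurably faster.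
import Mathlib
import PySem

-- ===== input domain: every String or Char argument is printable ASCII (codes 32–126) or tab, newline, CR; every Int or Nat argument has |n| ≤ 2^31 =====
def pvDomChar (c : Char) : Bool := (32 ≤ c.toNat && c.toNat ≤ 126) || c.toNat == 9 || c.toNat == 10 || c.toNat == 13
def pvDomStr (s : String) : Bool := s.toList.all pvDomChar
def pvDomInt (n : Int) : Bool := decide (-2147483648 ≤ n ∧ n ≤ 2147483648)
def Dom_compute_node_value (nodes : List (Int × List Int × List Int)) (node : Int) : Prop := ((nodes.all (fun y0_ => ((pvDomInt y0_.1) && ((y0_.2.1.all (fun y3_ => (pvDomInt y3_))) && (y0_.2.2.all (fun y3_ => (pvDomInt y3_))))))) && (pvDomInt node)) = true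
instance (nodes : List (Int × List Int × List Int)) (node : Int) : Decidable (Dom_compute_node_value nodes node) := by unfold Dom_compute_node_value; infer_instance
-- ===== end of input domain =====

-- B replaces A's top-down recursion by an iterative bottom-up fixpoint (passes over the
-- table resolving each node once its referenced children are resolved); same return value.

-- ===== PORT A =====
-- A's unbounded recursion, made total with a fuel guard; under Pre_ (no reference cycle
-- reachable from `node`) the recursion depth is bounded, so fuel nodes.length + 1 never
-- runs out and the port computes exactly A (proved below).
def pvComputeA : Nat → List (Int × List Int × List Int) → Int → Int
  | 0, _, _ => 0
  | f + 1, nodes, node =>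
    match (PySem.Dict.mk nodes).get? node with
    | none => 0                                   -- 'if node not in nodes: return 0'
    | some (children, metadata) =>
      if children.length = 0 then metadata.sum    -- 'return sum(metadata)'
      else
        metadata.foldl (fun s mt =>               -- 's = 0; for meta in metadata: …'
          match PySem.List.pyGet? children (mt - 1) with
          | none => s                             -- 'except IndexError: continue'
          | some child_ref =>
            if child_ref = 0 then s               -- 'if child_ref == 0: continue'
            else s + pvComputeA f nodes child_ref) 0

def compute_node_value (nodes : List (Int × List Int × List Int)) (node : Int) : Int :=
  pvComputeA (nodes.length + 1) nodes node

-- ===== PORT B =====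
-- 'refs = []; for m in metadata: if -len(children) < m <= len(children): …append(c)'
def pvRefs (children metadata : List Int) : List Int :=
  metadata.foldl (fun out m =>
    if -(children.length : Int) < m ∧ m ≤ (children.length : Int) then
      match PySem.List.pyGet? children (m - 1) with
      | some c => if c = 0 then out else out ++ [c]
      | none => out
    else out) []

-- 'c in nodes'
def pvIsKey (nodes : List (Int × List Int × List Int)) (c : Int) : Bool :=
  ((PySem.Dict.mk nodes).get? c).isSome

-- 'all(c not in nodes or c in values for c in rs)'
def pvReady (nodes : List (Int × List Int × List Int)) (vals : PySem.Dict Int Int)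
    (rs : List Int) : Bool :=
  rs.all (fun c => !(pvIsKey nodes c) || (vals.get? c).isSome)

-- the body of B's 'for k, (children, metadata) in nodes.items(): …'
def pvPassStep (nodes : List (Int × List Int × List Int))
    (p : PySem.Dict Int Int × Bool) (e : Int × List Int × List Int) :
    PySem.Dict Int Int × Bool :=
  match p.1.get? e.1 with
  | some _ => p                                           -- 'if k in values: continue'
  | none =>
    if e.2.1.length = 0 then (p.1.insert e.1 e.2.2.sum, true)
    else
      let rs := pvRefs e.2.1 e.2.2
      if pvReady nodes p.1 rs then
        (p.1.insert e.1 (rs.foldl (fun s c => s + p.1.getD c 0) 0), true)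
      else p

-- one pass over the table, returning (values, changed)
def pvPass (nodes : List (Int × List Int × List Int)) (vals : PySem.Dict Int Int) :
    PySem.Dict Int Int × Bool :=
  nodes.foldl (pvPassStep nodes) (vals, false)

-- 'while changed: …'; Python's loop makes at most nodes.length productive passes
-- (each inserts a new key) plus the final unchanged one, so fuel nodes.length + 1 is exact.
def pvLoopB (nodes : List (Int × List Int × List Int)) : Nat → PySem.Dict Int Int → PySem.Dict Int Int
  | 0, vals => vals
  | f + 1, vals =>
    let p := pvPass nodes vals
    if p.2 then pvLoopB nodes f p.1 else p.1

def compute_node_value_alt (nodes : List (Int × List Int × List Int)) (node : Int) : Int :=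
  (pvLoopB nodes (nodes.length + 1) PySem.Dict.empty).getD node 0

-- ===== PRECONDITION & SPEC =====
-- reference edges between keys, iterated to a reachability set (closed-form graph condition)
def pvStepK (nodes : List (Int × List Int × List Int)) (S : Finset Int) : Finset Int :=
  ((nodes.filter (fun e => decide (e.1 ∈ S))).flatMap
    (fun e => (pvRefs e.2.1 e.2.2).filter (fun c => pvIsKey nodes c))).toFinset

def pvIter (nodes : List (Int × List Int × List Int)) : Nat → Finset Int → Finset Int
  | 0, S => S
  | f + 1, S => pvIter nodes f (S ∪ pvStepK nodes S)

def pvReach (nodes : List (Int × List Int × List Int)) (x : Int) : Finset Int :=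
  pvIter nodes (nodes.length + 1) {x}

-- Pre_ excludes (a) association lists with duplicate keys, which no Python dict argument
-- produces, and (b) tables with a reference cycle reachable from `node`, on which A's
-- recursion never terminates (RecursionError).
def Pre_compute_node_value (nodes : List (Int × List Int × List Int)) (node : Int) : Prop :=
  (nodes.map Prod.fst).Nodup ∧
  ∀ e ∈ nodes, e.1 ∈ pvReach nodes node →
    ∀ c ∈ pvRefs e.2.1 e.2.2, pvIsKey nodes c = true → e.1 ∉ pvReach nodes c
instance (nodes : List (Int × List Int × List Int)) (node : Int) : Decidable (Pre_compute_node_value nodes node) := by unfold Pre_compute_node_value; infer_instance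

def pvWitness_compute_node_value : (List (Int × List Int × List Int)) × Int :=
  ([(0, [1, 2], [1, 2]), (1, [], [5]), (2, [], [7, 7])], 0)

def Spec_compute_node_value (nodes : List (Int × List Int × List Int)) (node : Int) (out : Int) : Prop := out = compute_node_value_alt nodes node
instance (nodes : List (Int × List Int × List Int)) (node : Int) (out : Int) : Decidable (Spec_compute_node_value nodes node out) := by unfold Spec_compute_node_value; infer_instance

-- ===== CLAIM (what is proved, stated in full; the proofs are below) =====
def Claim_equal_compute_node_value : Prop := ∀ (nodes : List (Int × List Int × List Int)) (node : Int), Dom_compute_node_value nodes node → Pre_compute_node_value nodes node → Spec_compute_node_value nodes node (compute_node_value nodes node)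

-- ===== LEMMAS AND PROOFS =====

-- ---------- pvRefs characterization ----------

lemma pvRefs_eq (ch md : List Int) :
    pvRefs ch md = md.filterMap (fun m =>
      match PySem.List.pyGet? ch (m - 1) with
      | some c => if c = 0 then none else some c
      | none => none) := by
  suffices h : ∀ (md : List Int) (acc : List Int),
      md.foldl (fun out m =>
        if -(ch.length : Int) < m ∧ m ≤ (ch.length : Int) then
          match PySem.List.pyGet? ch (m - 1) with
          | some c => if c = 0 then out else out ++ [c]
          | none => out
        else out) acc = acc ++ md.filterMap (fun m => match PySem.List.pyGet? ch (m - 1) with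
          | some c => if c = 0 then none else some c
          | none => none) by
    simpa [pvRefs] using h md []
  intro md
  induction md with
  | nil => intro acc; simp
  | cons m md ih =>
    intro acc
    simp only [List.foldl_cons, List.filterMap_cons]
    by_cases hb : -(ch.length : Int) < m ∧ m ≤ (ch.length : Int)
    · have hin : PySem.Raise.InRange ch.length (m - 1) := by
        simp only [PySem.Raise.InRange]; omega
      cases hg : PySem.List.pyGet? ch (m - 1) with
      | none => exact absurd hin ((PySem.List.pyGet?_eq_none_iff _ _).mp hg)
      | some c =>
        simp only [if_pos hb]
        by_cases hc : c = 0
        · simp [hc, ih]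
        · simp [hc, ih]
    · have hg : PySem.List.pyGet? ch (m - 1) = none := by
        apply (PySem.List.pyGet?_eq_none_iff _ _).mpr
        simp only [PySem.Raise.InRange]; omega
      simp only [if_neg hb, hg, ih]

lemma mem_pvRefs {ch md : List Int} {c : Int} :
    c ∈ pvRefs ch md ↔ ∃ m ∈ md, PySem.List.pyGet? ch (m - 1) = some c ∧ c ≠ 0 := by
  rw [pvRefs_eq]
  simp only [List.mem_filterMap]
  constructor
  · rintro ⟨m, hm, h⟩
    cases hg : PySem.List.pyGet? ch (m - 1) with
    | none => rw [hg] at h; simp at h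
    | some c' =>
      simp only [hg] at h
      by_cases hc : c' = 0
      · rw [if_pos hc] at h; cases h
      · rw [if_neg hc] at h
        cases h
        exact ⟨m, hm, hg, hc⟩
  · rintro ⟨m, hm, hg, hc⟩
    refine ⟨m, hm, ?_⟩
    simp only [hg]
    rw [if_neg hc]

-- ---------- dictionary facts ----------

lemma pvMem_of_get? {nodes : List (Int × List Int × List Int)} {k : Int} {v : List Int × List Int}
    (h : (PySem.Dict.mk nodes).get? k = some v) : (k, v) ∈ nodes :=
  PySem.Dict.mem_items_of_get?_eq_some _ h

lemma pvIsKey_of_mem {nodes : List (Int × List Int × List Int)} {e : Int × List Int × List Int}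
    (he : e ∈ nodes) : pvIsKey nodes e.1 = true := by
  unfold pvIsKey
  cases hg : (PySem.Dict.mk nodes).get? e.1 with
  | some v => rfl
  | none =>
    have hnk := (PySem.Dict.get?_eq_none_iff_not_mem_keys _ _).mp hg
    exact absurd (List.mem_map.mpr ⟨e, he, rfl⟩) hnk

lemma pvGet?_of_mem {nodes : List (Int × List Int × List Int)} {k : Int} {v : List Int × List Int}
    (hnd : (nodes.map Prod.fst).Nodup) (he : (k, v) ∈ nodes) :
    (PySem.Dict.mk nodes).get? k = some v :=
  PySem.Dict.get?_of_mem_items _ he hnd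

-- ---------- reachability ----------

lemma mem_pvStepK {nodes : List (Int × List Int × List Int)} {S : Finset Int} {c : Int} :
    c ∈ pvStepK nodes S ↔
      ∃ e ∈ nodes, e.1 ∈ S ∧ c ∈ pvRefs e.2.1 e.2.2 ∧ pvIsKey nodes c = true := by
  unfold pvStepK
  simp only [List.mem_toFinset, List.mem_flatMap, List.mem_filter, decide_eq_true_eq]
  constructor
  · rintro ⟨e, ⟨he, hS⟩, hc, hk⟩; exact ⟨e, he, hS, hc, hk⟩
  · rintro ⟨e, he, hS, hc, hk⟩; exact ⟨e, ⟨he, hS⟩, hc, hk⟩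

lemma pvStepK_subset_keys (nodes : List (Int × List Int × List Int)) (S : Finset Int) :
    pvStepK nodes S ⊆ (nodes.map Prod.fst).toFinset := by
  intro c hc
  rw [mem_pvStepK] at hc
  obtain ⟨e, _, _, _, hk⟩ := hc
  obtain ⟨v, hv⟩ := Option.isSome_iff_exists.mp hk
  exact List.mem_toFinset.mpr (List.mem_map.mpr ⟨(c, v), pvMem_of_get? hv, rfl⟩)

lemma pvStepK_mono {nodes : List (Int × List Int × List Int)} {S T : Finset Int} (h : S ⊆ T) :
    pvStepK nodes S ⊆ pvStepK nodes T := by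
  intro c hc
  rw [mem_pvStepK] at hc ⊢
  obtain ⟨e, he, hx, hr, hk⟩ := hc
  exact ⟨e, he, h hx, hr, hk⟩

lemma pvIter_extensive {nodes : List (Int × List Int × List Int)} :
    ∀ (f : Nat) (S : Finset Int), S ⊆ pvIter nodes f S := by
  intro f
  induction f with
  | zero => intro S; exact subset_rfl
  | succ f ih => intro S; exact Finset.subset_union_left.trans (ih _)

lemma pvIter_closed_subset {nodes : List (Int × List Int × List Int)} {T : Finset Int}
    (hT : pvStepK nodes T ⊆ T) :
    ∀ (f : Nat) {S : Finset Int}, S ⊆ T → pvIter nodes f S ⊆ T := by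
  intro f
  induction f with
  | zero => intro S h; exact h
  | succ f ih => intro S h; exact ih (Finset.union_subset h ((pvStepK_mono h).trans hT))

lemma pvIter_succ_right {nodes : List (Int × List Int × List Int)} :
    ∀ (f : Nat) (S : Finset Int),
      pvIter nodes (f + 1) S = pvIter nodes f S ∪ pvStepK nodes (pvIter nodes f S) := by
  intro f
  induction f with
  | zero => intro S; rfl
  | succ f ih => intro S; exact ih (S ∪ pvStepK nodes S)

lemma pvIter_subset_univ (nodes : List (Int × List Int × List Int)) (f : Nat) (S : Finset Int) :
    pvIter nodes f S ⊆ S ∪ (nodes.map Prod.fst).toFinset := by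
  apply pvIter_closed_subset
  · exact (pvStepK_subset_keys nodes _).trans Finset.subset_union_right
  · exact Finset.subset_union_left

lemma pvReach_closed (nodes : List (Int × List Int × List Int)) (x : Int) :
    pvStepK nodes (pvReach nodes x) ⊆ pvReach nodes x := by
  have hcard : ∀ i, (pvIter nodes i {x}).card ≤ nodes.length + 1 := by
    intro i
    calc (pvIter nodes i {x}).card
        ≤ (({x} : Finset Int) ∪ (nodes.map Prod.fst).toFinset).card :=
          Finset.card_le_card (pvIter_subset_univ nodes i {x})
      _ ≤ ({x} : Finset Int).card + (nodes.map Prod.fst).toFinset.card := Finset.card_union_le _ _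
      _ ≤ 1 + (nodes.map Prod.fst).length := by
          have := (nodes.map Prod.fst).toFinset_card_le
          simp only [Finset.card_singleton]
          omega
      _ = nodes.length + 1 := by rw [List.length_map]; omega
  have hmono : ∀ i, pvIter nodes i {x} ⊆ pvIter nodes (i + 1) {x} := by
    intro i; rw [pvIter_succ_right]; exact Finset.subset_union_left
  have hfix : ∃ i, i < nodes.length + 1 ∧ pvIter nodes (i + 1) {x} = pvIter nodes i {x} := by
    by_contra hno
    push Not at hno
    have hgrow : ∀ i, i ≤ nodes.length + 1 → i + 1 ≤ (pvIter nodes i {x}).card := by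
      intro i
      induction i with
      | zero =>
        intro _
        exact Finset.card_pos.mpr ⟨x, Finset.mem_singleton_self x⟩
      | succ i ih =>
        intro hi
        have hne := hno i (by omega)
        have hss : pvIter nodes i {x} ⊂ pvIter nodes (i + 1) {x} :=
          ⟨hmono i, fun h => hne (Finset.Subset.antisymm h (hmono i))⟩
        have h1 := Finset.card_lt_card hss
        have h2 := ih (by omega)
        omega
    have h1 := hgrow (nodes.length + 1) le_rfl
    have h2 := hcard (nodes.length + 1)
    omega
  obtain ⟨i, hiN, hfx⟩ := hfix
  have hstep : pvStepK nodes (pvIter nodes i {x}) ⊆ pvIter nodes i {x} := by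
    rw [pvIter_succ_right] at hfx
    intro c hc
    rw [← hfx]
    exact Finset.mem_union_right _ hc
  have hprop : ∀ j, pvIter nodes (i + j) {x} = pvIter nodes i {x} := by
    intro j
    induction j with
    | zero => rfl
    | succ j ih =>
      have : i + (j + 1) = (i + j) + 1 := rfl
      rw [this, pvIter_succ_right, ih]
      exact Finset.union_eq_left.mpr hstep
  have hN : pvReach nodes x = pvIter nodes i {x} := by
    have := hprop (nodes.length + 1 - i)
    rw [show i + (nodes.length + 1 - i) = nodes.length + 1 by omega] at this
    exact this
  rw [hN]
  exact hstep

lemma pvReach_self (nodes : List (Int × List Int × List Int)) (x : Int) :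
    x ∈ pvReach nodes x :=
  pvIter_extensive _ _ (Finset.mem_singleton_self x)

lemma pvReach_subset_of_mem {nodes : List (Int × List Int × List Int)} {x c : Int}
    (h : c ∈ pvReach nodes x) : pvReach nodes c ⊆ pvReach nodes x :=
  pvIter_closed_subset (pvReach_closed nodes x) _ (Finset.singleton_subset_iff.mpr h)

lemma pvEdge_mem_reach {nodes : List (Int × List Int × List Int)} {x k c : Int}
    {ch md : List Int} (he : (k, ch, md) ∈ nodes) (hx : k ∈ pvReach nodes x)
    (hc : c ∈ pvRefs ch md) (hk : pvIsKey nodes c = true) : c ∈ pvReach nodes x :=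
  pvReach_closed nodes x (mem_pvStepK.mpr ⟨(k, ch, md), he, hx, hc, hk⟩)

-- the termination measure: size of the reachable set
def pvRank (nodes : List (Int × List Int × List Int)) (x : Int) : Nat :=
  (pvReach nodes x).card

lemma pvRank_pos (nodes : List (Int × List Int × List Int)) (x : Int) : 1 ≤ pvRank nodes x :=
  Finset.card_pos.mpr ⟨x, pvReach_self nodes x⟩

lemma pvRank_le_of_key {nodes : List (Int × List Int × List Int)} {x : Int}
    (hk : pvIsKey nodes x = true) : pvRank nodes x ≤ nodes.length := by
  obtain ⟨v, hv⟩ := Option.isSome_iff_exists.mp hk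
  have hx : x ∈ (nodes.map Prod.fst).toFinset :=
    List.mem_toFinset.mpr (List.mem_map.mpr ⟨(x, v), pvMem_of_get? hv, rfl⟩)
  have h1 : pvReach nodes x ⊆ (nodes.map Prod.fst).toFinset := by
    have := pvIter_subset_univ nodes (nodes.length + 1) {x}
    rwa [Finset.union_eq_right.mpr (Finset.singleton_subset_iff.mpr hx)] at this
  calc (pvReach nodes x).card ≤ (nodes.map Prod.fst).toFinset.card := Finset.card_le_card h1
    _ ≤ (nodes.map Prod.fst).length := (nodes.map Prod.fst).toFinset_card_le
    _ = nodes.length := by simp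

lemma pvRank_lt {nodes : List (Int × List Int × List Int)} {node0 : Int}
    (hpre : Pre_compute_node_value nodes node0) {k c : Int} {ch md : List Int}
    (he : (k, ch, md) ∈ nodes) (hx : k ∈ pvReach nodes node0)
    (hc : c ∈ pvRefs ch md) (hk : pvIsKey nodes c = true) :
    pvRank nodes c < pvRank nodes k := by
  have hcx : c ∈ pvReach nodes k := pvEdge_mem_reach he (pvReach_self nodes k) hc hk
  have hsub : pvReach nodes c ⊆ pvReach nodes k := pvReach_subset_of_mem hcx
  have hnx : k ∉ pvReach nodes c := hpre.2 (k, ch, md) he hx c hc hk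
  exact Finset.card_lt_card ⟨hsub, fun h => hnx (h (pvReach_self nodes k))⟩

-- ---------- A-side ----------

lemma pvComputeA_nokey {nodes : List (Int × List Int × List Int)} {x : Int}
    (h : (PySem.Dict.mk nodes).get? x = none) : ∀ f, pvComputeA f nodes x = 0
  | 0 => rfl
  | f + 1 => by simp [pvComputeA, h]

-- the fuel-independent value of a node
def pvAval (nodes : List (Int × List Int × List Int)) (x : Int) : Int :=
  pvComputeA (pvRank nodes x + 1) nodes x

lemma pvAval_nokey {nodes : List (Int × List Int × List Int)} {x : Int}
    (h : (PySem.Dict.mk nodes).get? x = none) : pvAval nodes x = 0 :=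
  pvComputeA_nokey h _

lemma pvNokey_of_not_isKey {nodes : List (Int × List Int × List Int)} {x : Int}
    (h : ¬ pvIsKey nodes x = true) : (PySem.Dict.mk nodes).get? x = none := by
  unfold pvIsKey at h
  cases hg : (PySem.Dict.mk nodes).get? x with
  | none => rfl
  | some v => rw [hg] at h; simp at h

set_option maxHeartbeats 1000000 in
lemma pvComputeA_fuel {nodes : List (Int × List Int × List Int)} {node0 : Int}
    (hpre : Pre_compute_node_value nodes node0) :
    ∀ (f1 : Nat) (x : Int) (f2 : Nat), x ∈ pvReach nodes node0 →
      pvRank nodes x < f1 → pvRank nodes x < f2 →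
      pvComputeA f1 nodes x = pvComputeA f2 nodes x := by
  intro f1
  induction f1 with
  | zero => intro x f2 _ h1 _; omega
  | succ f1 ih =>
    intro x f2 hx h1 h2
    cases f2 with
    | zero => omega
    | succ f2 =>
      simp only [pvComputeA]
      cases hget : (PySem.Dict.mk nodes).get? x with
      | none => rfl
      | some v =>
        rcases v with ⟨ch, md⟩
        by_cases hcl : ch.length = 0
        · simp [hcl]
        · simp only [if_neg hcl]
          apply PySem.List.foldl_congr_mem
          intro s mt hmt
          cases hgc : PySem.List.pyGet? ch (mt - 1) with
          | none => rfl
          | some c =>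
            by_cases hc0 : c = 0
            · simp [hc0]
            · simp only [if_neg hc0]
              congr 1
              by_cases hk : pvIsKey nodes c = true
              · have he : (x, ch, md) ∈ nodes := pvMem_of_get? hget
                have hcr : c ∈ pvRefs ch md := mem_pvRefs.mpr ⟨mt, hmt, hgc, hc0⟩
                have hlt : pvRank nodes c < pvRank nodes x := pvRank_lt hpre he hx hcr hk
                have hcin : c ∈ pvReach nodes node0 := pvEdge_mem_reach he hx hcr hk
                exact ih c f2 hcin (by omega) (by omega)
              · have hnone := pvNokey_of_not_isKey hk
                rw [pvComputeA_nokey hnone, pvComputeA_nokey hnone]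

set_option maxHeartbeats 1000000 in
lemma pvAval_eq {nodes : List (Int × List Int × List Int)} {node0 : Int}
    (hpre : Pre_compute_node_value nodes node0) {x : Int} {ch md : List Int}
    (hx : x ∈ pvReach nodes node0)
    (hget : (PySem.Dict.mk nodes).get? x = some (ch, md)) :
    pvAval nodes x = if ch.length = 0 then md.sum
      else (pvRefs ch md).foldl (fun s c => s + pvAval nodes c) 0 := by
  unfold pvAval
  obtain ⟨r, hr⟩ : ∃ r, pvRank nodes x = r + 1 :=
    ⟨pvRank nodes x - 1, by have := pvRank_pos nodes x; omega⟩
  rw [hr]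
  show pvComputeA (r + 1 + 1) nodes x = _
  simp only [pvComputeA, hget]
  by_cases hcl : ch.length = 0
  · simp [hcl]
  · simp only [if_neg hcl]
    rw [pvRefs_eq, List.foldl_filterMap]
    apply PySem.List.foldl_congr_mem
    intro s mt hmt
    cases hgc : PySem.List.pyGet? ch (mt - 1) with
    | none => rfl
    | some c =>
      by_cases hc0 : c = 0
      · simp [hc0]
      · simp only [if_neg hc0]
        have hAc : pvComputeA (r + 1) nodes c = pvAval nodes c := by
          by_cases hk : pvIsKey nodes c = true
          · have he : (x, ch, md) ∈ nodes := pvMem_of_get? hget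
            have hcr : c ∈ pvRefs ch md := mem_pvRefs.mpr ⟨mt, hmt, hgc, hc0⟩
            have hlt : pvRank nodes c < pvRank nodes x := pvRank_lt hpre he hx hcr hk
            have hcin : c ∈ pvReach nodes node0 := pvEdge_mem_reach he hx hcr hk
            exact pvComputeA_fuel hpre (r + 1) c (pvRank nodes c + 1) hcin (by omega) (by omega)
          · have hnone := pvNokey_of_not_isKey hk
            rw [pvComputeA_nokey hnone, pvAval_nokey hnone]
        exact congrArg (fun t => s + t) hAc

-- ---------- B-side ----------

-- every binding of one dictionary also in the other (B's values only grow)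
def pvSub (d d' : PySem.Dict Int Int) : Prop :=
  ∀ k v, d.get? k = some v → d'.get? k = some v

-- cache invariant: bound keys are table keys, and on the reachable part the value is A's
def pvSound (nodes : List (Int × List Int × List Int)) (node0 : Int)
    (d : PySem.Dict Int Int) : Prop :=
  ∀ k v, d.get? k = some v →
    pvIsKey nodes k = true ∧ (k ∈ pvReach nodes node0 → v = pvAval nodes k)

lemma pvSub_refl (d : PySem.Dict Int Int) : pvSub d d := fun _ _ h => h

lemma pvSub_trans {d d' d'' : PySem.Dict Int Int} (h1 : pvSub d d') (h2 : pvSub d' d'') :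
    pvSub d d'' := fun k v h => h2 k v (h1 k v h)

lemma pvSub_insert {d : PySem.Dict Int Int} {k : Int} {v : Int}
    (h : d.get? k = none) : pvSub d (d.insert k v) := by
  intro k' v' h'
  rcases eq_or_ne k' k with rfl | hne
  · rw [h'] at h; cases h
  · rw [PySem.Dict.get?_insert_of_ne _ _ hne]; exact h'

lemma pvPassStep_sub (nodes : List (Int × List Int × List Int))
    (p : PySem.Dict Int Int × Bool) (e : Int × List Int × List Int) :
    pvSub p.1 (pvPassStep nodes p e).1 := by
  simp only [pvPassStep]
  cases hg : p.1.get? e.1 with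
  | some v => exact pvSub_refl _
  | none =>
    by_cases hcl : e.2.1.length = 0
    · simp only [if_pos hcl]; exact pvSub_insert hg
    · simp only [if_neg hcl]
      by_cases hr : pvReady nodes p.1 (pvRefs e.2.1 e.2.2) = true
      · simp only [if_pos hr]; exact pvSub_insert hg
      · simp only [if_neg hr]; exact pvSub_refl _

lemma pvFold_sub (nodes : List (Int × List Int × List Int)) :
    ∀ (l : List (Int × List Int × List Int)) (p : PySem.Dict Int Int × Bool),
      pvSub p.1 (l.foldl (pvPassStep nodes) p).1 := by
  intro l
  induction l with
  | nil => intro p; exact pvSub_refl _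
  | cons e l ih => intro p; exact pvSub_trans (pvPassStep_sub nodes p e) (ih _)

lemma pvPassStep_sound {nodes : List (Int × List Int × List Int)} {node0 : Int}
    (hpre : Pre_compute_node_value nodes node0) {p : PySem.Dict Int Int × Bool}
    {e : Int × List Int × List Int} (he : e ∈ nodes)
    (hs : pvSound nodes node0 p.1) : pvSound nodes node0 (pvPassStep nodes p e).1 := by
  rcases e with ⟨k, ch, md⟩
  have hkey : pvIsKey nodes k = true := pvIsKey_of_mem he
  have hget : (PySem.Dict.mk nodes).get? k = some (ch, md) := pvGet?_of_mem hpre.1 he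
  simp only [pvPassStep]
  cases hg : p.1.get? k with
  | some v => exact hs
  | none =>
    by_cases hcl : ch.length = 0
    · simp only [if_pos hcl]
      intro k' v' h'
      rcases eq_or_ne k' k with rfl | hne
      · rw [PySem.Dict.get?_insert_self _ _ _] at h'
        cases h'
        refine ⟨hkey, fun hk' => ?_⟩
        rw [pvAval_eq hpre hk' hget, if_pos hcl]
      · rw [PySem.Dict.get?_insert_of_ne _ _ hne] at h'
        exact hs k' v' h'
    · simp only [if_neg hcl]
      by_cases hrdy : pvReady nodes p.1 (pvRefs ch md) = true
      · simp only [if_pos hrdy]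
        intro k' v' h'
        rcases eq_or_ne k' k with rfl | hne
        · rw [PySem.Dict.get?_insert_self _ _ _] at h'
          cases h'
          refine ⟨hkey, fun hk' => ?_⟩
          rw [pvAval_eq hpre hk' hget, if_neg hcl]
          apply PySem.List.foldl_congr_mem
          intro s c hc
          congr 1
          by_cases hck : pvIsKey nodes c = true
          · have hcsome : (p.1.get? c).isSome = true := by
              have hall := List.all_eq_true.mp hrdy c hc
              rcases Bool.or_eq_true_iff.mp hall with h | h
              · rw [hck] at h; cases h
              · exact h
            obtain ⟨w, hw⟩ := Option.isSome_iff_exists.mp hcsome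
            have hcr : c ∈ pvReach nodes node0 := pvEdge_mem_reach he hk' hc hck
            have hwv : w = pvAval nodes c := (hs c w hw).2 hcr
            rw [PySem.Dict.getD_eq_get?_getD _ _ _, hw, Option.getD_some, hwv]
          · have hnone : p.1.get? c = none := by
              cases hgc : p.1.get? c with
              | none => rfl
              | some w => exact absurd (hs c w hgc).1 hck
            rw [PySem.Dict.getD_eq_get?_getD _ _ _, hnone, Option.getD_none,
              pvAval_nokey (pvNokey_of_not_isKey hck)]
        · rw [PySem.Dict.get?_insert_of_ne _ _ hne] at h'
          exact hs k' v' h'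
      · simp only [if_neg hrdy]; exact hs

lemma pvFold_sound {nodes : List (Int × List Int × List Int)} {node0 : Int}
    (hpre : Pre_compute_node_value nodes node0) :
    ∀ (l : List (Int × List Int × List Int)) (p : PySem.Dict Int Int × Bool),
      (∀ e ∈ l, e ∈ nodes) → pvSound nodes node0 p.1 →
      pvSound nodes node0 (l.foldl (pvPassStep nodes) p).1 := by
  intro l
  induction l with
  | nil => intro p _ hs; exact hs
  | cons e l ih =>
    intro p hmem hs
    exact ih _ (fun e' h => hmem e' (List.mem_cons_of_mem _ h))
      (pvPassStep_sound hpre (hmem e List.mem_cons_self) hs)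

lemma pvPassStep_true {nodes : List (Int × List Int × List Int)}
    {p : PySem.Dict Int Int × Bool} {e : Int × List Int × List Int}
    (h : p.2 = true) : (pvPassStep nodes p e).2 = true := by
  simp only [pvPassStep]
  cases hg : p.1.get? e.1 with
  | some v => exact h
  | none =>
    by_cases hcl : e.2.1.length = 0
    · simp [hcl]
    · simp only [if_neg hcl]
      by_cases hr : pvReady nodes p.1 (pvRefs e.2.1 e.2.2) = true
      · simp [hr]
      · simp only [if_neg hr]; exact h

lemma pvFold_true (nodes : List (Int × List Int × List Int)) :
    ∀ (l : List (Int × List Int × List Int)) (p : PySem.Dict Int Int × Bool),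
      p.2 = true → (l.foldl (pvPassStep nodes) p).2 = true := by
  intro l
  induction l with
  | nil => intro p h; exact h
  | cons e l ih => intro p h; exact ih _ (pvPassStep_true h)

lemma pvReady_mono {nodes : List (Int × List Int × List Int)}
    {d d' : PySem.Dict Int Int} {rs : List Int} (hsub : pvSub d d')
    (h : pvReady nodes d rs = true) : pvReady nodes d' rs = true := by
  unfold pvReady at h ⊢
  rw [List.all_eq_true] at h ⊢
  intro c hc
  rcases Bool.or_eq_true_iff.mp (h c hc) with h1 | h1
  · exact Bool.or_eq_true_iff.mpr (Or.inl h1)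
  · obtain ⟨w, hw⟩ := Option.isSome_iff_exists.mp h1
    refine Bool.or_eq_true_iff.mpr (Or.inr ?_)
    rw [hsub c w hw]
    rfl

lemma pvFold_resolves {nodes : List (Int × List Int × List Int)} (vals0 : PySem.Dict Int Int) :
    ∀ (l : List (Int × List Int × List Int)) (p : PySem.Dict Int Int × Bool),
      pvSub vals0 p.1 →
      ∀ e ∈ l, (e.2.1.length = 0 ∨ pvReady nodes vals0 (pvRefs e.2.1 e.2.2) = true) →
      (((l.foldl (pvPassStep nodes) p).1).get? e.1).isSome = true := by
  intro l
  induction l with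
  | nil => intro p _ e he; cases he
  | cons a l ih =>
    intro p hsub e he hready
    rcases List.mem_cons.mp he with rfl | hel
    · have hres : ((pvPassStep nodes p e).1.get? e.1).isSome = true := by
        simp only [pvPassStep]
        cases hg : p.1.get? e.1 with
        | some v => simp [hg]
        | none =>
          by_cases hcl : e.2.1.length = 0
          · simp [hcl, PySem.Dict.get?_insert_self _ _ _]
          · rcases hready with hcl' | hrd
            · exact absurd hcl' hcl
            · have hrd' := pvReady_mono hsub hrd
              simp [hcl, hrd', PySem.Dict.get?_insert_self _ _ _]
      obtain ⟨w, hw⟩ := Option.isSome_iff_exists.mp hres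
      rw [List.foldl_cons, pvFold_sub nodes l (pvPassStep nodes p e) e.1 w hw]
      rfl
    · exact ih (pvPassStep nodes p a) (pvSub_trans hsub (pvPassStep_sub nodes p a)) e hel hready

lemma pvPassStep_false {nodes : List (Int × List Int × List Int)}
    {p : PySem.Dict Int Int × Bool} {e : Int × List Int × List Int}
    (h : (pvPassStep nodes p e).2 = false) :
    pvPassStep nodes p e = p ∧
      ((p.1.get? e.1).isSome = true ∨
        (e.2.1.length ≠ 0 ∧ pvReady nodes p.1 (pvRefs e.2.1 e.2.2) = false)) := by
  revert h
  simp only [pvPassStep]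
  cases hg : p.1.get? e.1 with
  | some v => intro _; exact ⟨rfl, Or.inl (by simp)⟩
  | none =>
    by_cases hcl : e.2.1.length = 0
    · simp [hcl]
    · simp only [if_neg hcl]
      by_cases hrd : pvReady nodes p.1 (pvRefs e.2.1 e.2.2) = true
      · simp [hrd]
      · simp only [if_neg hrd]
        intro _
        exact ⟨trivial, Or.inr ⟨hcl, by simpa using hrd⟩⟩

lemma pvFold_false {nodes : List (Int × List Int × List Int)} :
    ∀ (l : List (Int × List Int × List Int)) (p : PySem.Dict Int Int × Bool),
      (l.foldl (pvPassStep nodes) p).2 = false →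
      l.foldl (pvPassStep nodes) p = p ∧
      ∀ e ∈ l, (p.1.get? e.1).isSome = true ∨
        (e.2.1.length ≠ 0 ∧ pvReady nodes p.1 (pvRefs e.2.1 e.2.2) = false) := by
  intro l
  induction l with
  | nil => intro p h; exact ⟨rfl, by simp⟩
  | cons a l ih =>
    intro p h
    rw [List.foldl_cons] at h
    have h1 : (pvPassStep nodes p a).2 = false := by
      cases hb : (pvPassStep nodes p a).2 with
      | false => rfl
      | true => rw [pvFold_true nodes l _ hb] at h; cases h
    obtain ⟨hstep, hcond⟩ := pvPassStep_false h1
    rw [hstep] at h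
    obtain ⟨hfold, hall⟩ := ih p h
    rw [List.foldl_cons, hstep]
    refine ⟨hfold, fun e he => ?_⟩
    rcases List.mem_cons.mp he with rfl | hel
    · exact hcond
    · exact hall e hel

lemma pvAllResolved {nodes : List (Int × List Int × List Int)} {node0 : Int}
    (hpre : Pre_compute_node_value nodes node0) {d : PySem.Dict Int Int}
    (hnc : ∀ e ∈ nodes, (d.get? e.1).isSome = true ∨
      (e.2.1.length ≠ 0 ∧ pvReady nodes d (pvRefs e.2.1 e.2.2) = false)) :
    ∀ (r : Nat) (k : Int), pvRank nodes k ≤ r → pvIsKey nodes k = true →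
      k ∈ pvReach nodes node0 → (d.get? k).isSome = true := by
  intro r
  induction r with
  | zero => intro k hr _ _; have := pvRank_pos nodes k; omega
  | succ r ih =>
    intro k hr hk hkin
    obtain ⟨⟨ch, md⟩, hget⟩ := Option.isSome_iff_exists.mp hk
    have he : (k, ch, md) ∈ nodes := pvMem_of_get? hget
    rcases hnc _ he with hsome | ⟨hcl, hnotrdy⟩
    · exact hsome
    · exfalso
      unfold pvReady at hnotrdy
      obtain ⟨c, hcmem, hcfail⟩ := List.all_eq_false.mp hnotrdy
      rw [Bool.or_eq_true_iff, not_or] at hcfail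
      obtain ⟨hck', hcun⟩ := hcfail
      have hck : pvIsKey nodes c = true := by
        cases hb : pvIsKey nodes c with
        | true => rfl
        | false => exact absurd (by rw [hb]; rfl) hck'
      have hlt := pvRank_lt hpre he hkin hcmem hck
      have hcin := pvEdge_mem_reach he hkin hcmem hck
      exact hcun (ih c (by omega) hck hcin)

lemma pvLoop_main {nodes : List (Int × List Int × List Int)} {node0 : Int}
    (hpre : Pre_compute_node_value nodes node0) :
    ∀ (f r : Nat) (vals : PySem.Dict Int Int), pvSound nodes node0 vals →
      (∀ k, pvRank nodes k ≤ r → pvIsKey nodes k = true → k ∈ pvReach nodes node0 →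
        (vals.get? k).isSome = true) →
      pvSound nodes node0 (pvLoopB nodes f vals) ∧
      (∀ k, pvRank nodes k ≤ r + f → pvIsKey nodes k = true → k ∈ pvReach nodes node0 →
        ((pvLoopB nodes f vals).get? k).isSome = true) := by
  intro f
  induction f with
  | zero =>
    intro r vals hs hres
    exact ⟨hs, fun k h => hres k (by omega)⟩
  | succ f ih =>
    intro r vals hs hres
    have hsub : pvSub vals (pvPass nodes vals).1 := pvFold_sub nodes nodes (vals, false)
    have hsnd : pvSound nodes node0 (pvPass nodes vals).1 :=
      pvFold_sound hpre nodes (vals, false) (fun _ h => h) hs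
    have hres' : ∀ k, pvRank nodes k ≤ r + 1 → pvIsKey nodes k = true →
        k ∈ pvReach nodes node0 → (((pvPass nodes vals).1).get? k).isSome = true := by
      intro k hr hk hkin
      obtain ⟨⟨ch, md⟩, hget⟩ := Option.isSome_iff_exists.mp hk
      have he : (k, ch, md) ∈ nodes := pvMem_of_get? hget
      have hready : ((k, ch, md) : Int × List Int × List Int).2.1.length = 0 ∨
          pvReady nodes vals (pvRefs ch md) = true := by
        by_cases hcl : ch.length = 0
        · exact Or.inl hcl
        · refine Or.inr ?_
          unfold pvReady
          rw [List.all_eq_true]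
          intro c hc
          by_cases hck : pvIsKey nodes c = true
          · have hlt := pvRank_lt hpre he hkin hc hck
            have hcin := pvEdge_mem_reach he hkin hc hck
            have hsome := hres c (by omega) hck hcin
            rw [hsome]
            simp
          · rw [Bool.not_eq_true] at hck
            rw [hck]
            rfl
      exact pvFold_resolves vals nodes (vals, false) (pvSub_refl _) (k, ch, md) he hready
    simp only [pvLoopB]
    cases hc2 : (pvPass nodes vals).2 with
    | true =>
      rw [if_pos rfl]
      obtain ⟨hg1, hg2⟩ := ih (r + 1) (pvPass nodes vals).1 hsnd hres'
      exact ⟨hg1, fun k h hk hkin => hg2 k (by omega) hk hkin⟩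
    | false =>
      rw [if_neg (by simp)]
      obtain ⟨hfix, hnc⟩ := pvFold_false nodes (vals, false) hc2
      have h1 : (pvPass nodes vals).1 = vals := by
        unfold pvPass
        rw [hfix]
      rw [h1]
      refine ⟨hs, fun k _ hk hkin => ?_⟩
      exact pvAllResolved hpre hnc (pvRank nodes k) k le_rfl hk hkin

-- ===== VERDICT (by name: the statement is the Claim_ definition above) =====
theorem compute_node_value_spec : Claim_equal_compute_node_value := by
  intro nodes node _ hpre
  unfold Spec_compute_node_value compute_node_value compute_node_value_alt
  have hmain := pvLoop_main hpre (nodes.length + 1) 0 PySem.Dict.empty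
    (fun k v h => by rw [PySem.Dict.get?_empty] at h; cases h)
    (fun k hr _ _ => by have := pvRank_pos nodes k; omega)
  by_cases hk : pvIsKey nodes node = true
  · have hle := pvRank_le_of_key hk
    have hA : pvComputeA (nodes.length + 1) nodes node = pvAval nodes node :=
      pvComputeA_fuel hpre _ node _ (pvReach_self nodes node) (by omega) (by omega)
    have hr := hmain.2 node (by omega) hk (pvReach_self nodes node)
    obtain ⟨v, hv⟩ := Option.isSome_iff_exists.mp hr
    have hval := (hmain.1 node v hv).2 (pvReach_self nodes node)
    rw [hA, PySem.Dict.getD_eq_get?_getD, hv, Option.getD_some, hval]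
  · have hnone := pvNokey_of_not_isKey hk
    have hbn : (pvLoopB nodes (nodes.length + 1) PySem.Dict.empty).get? node = none := by
      cases hg : (pvLoopB nodes (nodes.length + 1) PySem.Dict.empty).get? node with
      | none => rfl
      | some v => exact absurd (hmain.1 node v hg).1 hk
    rw [pvComputeA_nokey hnone, PySem.Dict.getD_eq_get?_getD, hbn]
    rfl
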